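-- pv_equiv track=rewrite | github.com/UliG1430/CodigosPython | PRACTICA 2/ejer4prac2.py | evaluar_resumen
-- ===== SOURCE A (Python) =====
-- def evaluar_resumen (resumen):
--     evaluaciones= {"faciles de leer":0,"aceptable para leer":0, "dificil de leer":0, "muy dificil":0}
--     resumen= resumen.split(".")
--     for i in resumen:
--         oracion=i
--         if not oracion:
--             continue
--         cantidad= (len(oracion.split()))
--         match cantidad:
--             case cantidad if (0 < cantidad <= 12):
--                 evaluaciones["faciles de leer"]+=1
--             case cantidad if (13 <= cantidad <= 17):
--                 evaluaciones["aceptable para leer"]+=1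
--             case cantidad if (18 <= cantidad <= 25):
--                 evaluaciones["dificil de leer"]+=1
--             case cantidad if (cantidad > 25):
--                 evaluaciones["muy dificil"]+=1
--     return evaluaciones
-- ===== SOURCE B (Python) =====
-- def evaluar_resumen(resumen):
--     counts = [len(s.split()) for s in resumen.split(".")]
--     return {
--         "faciles de leer": sum(1 for c in counts if 0 < c <= 12),
--         "aceptable para leer": sum(1 for c in counts if 13 <= c <= 17),
--         "dificil de leer": sum(1 for c in counts if 18 <= c <= 25),
--         "muy dificil": sum(1 for c in counts if c > 25),
--     }
-- ===== Notes on version B (the rewrite author's own statement) =====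
-- stated objective: simpler
-- what changed: Replaces the single branching match/continue loop that mutates a dict with a flat list of per-sentence word counts followed by four independent range-counting passes that build the dict directly (the 0<c guard subsumes A's empty-sentence continue).
import Mathlib
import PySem

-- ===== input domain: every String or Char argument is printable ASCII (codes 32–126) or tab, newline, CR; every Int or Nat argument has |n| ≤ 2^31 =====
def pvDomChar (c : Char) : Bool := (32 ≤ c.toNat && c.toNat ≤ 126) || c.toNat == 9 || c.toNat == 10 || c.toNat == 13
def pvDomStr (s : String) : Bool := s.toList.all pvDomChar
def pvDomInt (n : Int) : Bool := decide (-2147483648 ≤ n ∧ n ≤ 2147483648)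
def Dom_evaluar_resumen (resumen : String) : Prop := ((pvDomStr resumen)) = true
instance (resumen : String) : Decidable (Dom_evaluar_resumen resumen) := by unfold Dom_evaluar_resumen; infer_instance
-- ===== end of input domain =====

set_option maxHeartbeats 1000000


-- B replaces A's single branching dict-mutating loop by a flat list of word counts plus four
-- independent range-counting passes; same result, simpler shape (no speed claim).

-- ===== PORT A =====
def evaluar_resumen (resumen : String) : List (String × Int) :=
  let evaluaciones : PySem.Dict String Int :=
    PySem.Dict.ofList [("faciles de leer", 0), ("aceptable para leer", 0),
                       ("dificil de leer", 0), ("muy dificil", 0)]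
  let parts := ((PySem.Str.split? resumen ".").getD [])  -- sep "." ≠ "" so split? is some; exact
  let evaluaciones := parts.foldl (fun ev i =>
    let oracion := i
    if oracion = "" then ev
    else
      let cantidad : Int := ((PySem.Str.split₀ oracion).length : Int)
      if 0 < cantidad ∧ cantidad ≤ 12 then ev.modify "faciles de leer" 0 (· + 1)
      else if 13 ≤ cantidad ∧ cantidad ≤ 17 then ev.modify "aceptable para leer" 0 (· + 1)
      else if 18 ≤ cantidad ∧ cantidad ≤ 25 then ev.modify "dificil de leer" 0 (· + 1)
      else if 25 < cantidad then ev.modify "muy dificil" 0 (· + 1)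
      else ev) evaluaciones
  evaluaciones.items

-- ===== PORT B =====
-- sum(1 for c in counts if p c)
def pvCount (p : Int → Bool) (counts : List Int) : Int :=
  counts.foldl (fun acc c => if p c then acc + 1 else acc) 0

def evaluar_resumen_alt (resumen : String) : List (String × Int) :=
  let counts := (((PySem.Str.split? resumen ".").getD [])).map
    (fun s => ((PySem.Str.split₀ s).length : Int))
  [("faciles de leer", pvCount (fun c => 0 < c && c ≤ 12) counts),
   ("aceptable para leer", pvCount (fun c => 13 ≤ c && c ≤ 17) counts),
   ("dificil de leer", pvCount (fun c => 18 ≤ c && c ≤ 25) counts),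
   ("muy dificil", pvCount (fun c => 25 < c) counts)]

-- ===== PRECONDITION & SPEC =====
def Spec_evaluar_resumen (resumen : String) (out : List (String × Int)) : Prop := out = evaluar_resumen_alt resumen
instance (resumen : String) (out : List (String × Int)) : Decidable (Spec_evaluar_resumen resumen out) := by unfold Spec_evaluar_resumen; infer_instance

-- ===== CLAIM (what is proved, stated in full; the proofs are below) =====
def Claim_equal_evaluar_resumen : Prop := ∀ (resumen : String), Dom_evaluar_resumen resumen → Spec_evaluar_resumen resumen (evaluar_resumen resumen)

-- ===== LEMMAS AND PROOFS =====

-- the four-counter dict A's loop maintains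
def pvD (a b c d : Int) : PySem.Dict String Int :=
  PySem.Dict.ofList [("faciles de leer", a), ("aceptable para leer", b),
                     ("dificil de leer", c), ("muy dificil", d)]

lemma pvD_mod1 (a b c d : Int) :
    (pvD a b c d).modify "faciles de leer" 0 (· + 1) = pvD (a + 1) b c d := rfl

lemma pvD_mod2 (a b c d : Int) :
    (pvD a b c d).modify "aceptable para leer" 0 (· + 1) = pvD a (b + 1) c d := rfl

lemma pvD_mod3 (a b c d : Int) :
    (pvD a b c d).modify "dificil de leer" 0 (· + 1) = pvD a b (c + 1) d := rfl

lemma pvD_mod4 (a b c d : Int) :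
    (pvD a b c d).modify "muy dificil" 0 (· + 1) = pvD a b c (d + 1) := rfl

lemma pvCount_cons (p : Int → Bool) (x : Int) (l : List Int) :
    pvCount p (x :: l) = (if p x then 1 else 0) + pvCount p l := by
  simp [pvCount, PySem.List.foldl_if_add_one]

-- A's word count per sentence
def pvWc (s : String) : Int := ((PySem.Str.split₀ s).length : Int)

lemma loop_lemma (l : List String) (a b c d : Int) :
    (l.foldl (fun ev i =>
      if i = "" then ev
      else
        let cantidad : Int := ((PySem.Str.split₀ i).length : Int)
        if 0 < cantidad ∧ cantidad ≤ 12 then ev.modify "faciles de leer" 0 (· + 1)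
        else if 13 ≤ cantidad ∧ cantidad ≤ 17 then ev.modify "aceptable para leer" 0 (· + 1)
        else if 18 ≤ cantidad ∧ cantidad ≤ 25 then ev.modify "dificil de leer" 0 (· + 1)
        else if 25 < cantidad then ev.modify "muy dificil" 0 (· + 1)
        else ev) (pvD a b c d)) =
    pvD (a + pvCount (fun c => 0 < c && c ≤ 12) (l.map pvWc))
        (b + pvCount (fun c => 13 ≤ c && c ≤ 17) (l.map pvWc))
        (c + pvCount (fun c => 18 ≤ c && c ≤ 25) (l.map pvWc))
        (d + pvCount (fun c => 25 < c) (l.map pvWc)) := by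
  induction l generalizing a b c d with
  | nil => simp [pvCount]
  | cons x xs ih =>
    simp only [List.foldl_cons]
    by_cases hx : x = ""
    · subst hx
      rw [if_pos rfl, ih]
      have hwc : pvWc "" = (0 : Int) := by decide
      have b1 : (decide ((0:Int) < 0) && decide ((0:Int) ≤ 12)) = false := by decide
      have b2 : (decide ((13:Int) ≤ 0) && decide ((0:Int) ≤ 17)) = false := by decide
      have b3 : (decide ((18:Int) ≤ 0) && decide ((0:Int) ≤ 25)) = false := by decide
      have b4 : decide ((25:Int) < 0) = false := by decide
      simp only [List.map_cons, pvCount_cons, hwc, b1, b2, b3, b4, Bool.false_eq_true,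
        if_true, if_false]
      congr 1 <;> ring
    · rw [if_neg hx]
      set n : Int := ((PySem.Str.split₀ x).length : Int) with hn
      have hwc : pvWc x = n := rfl
      have hnn : (0:Int) ≤ n := hn ▸ Int.natCast_nonneg _
      split_ifs with h1 h2 h3 h4 <;>
        [skip; push_neg at h1; push_neg at h1 h2; push_neg at h1 h2 h3; push_neg at h1 h2 h3 h4] <;>
        [rw [pvD_mod1, ih]; rw [pvD_mod2, ih]; rw [pvD_mod3, ih]; rw [pvD_mod4, ih]; rw [ih]] <;>
        (have b1 : (decide (0 < n) && decide (n ≤ 12)) = decide (0 < n ∧ n ≤ 12) := by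
          by_cases hp : (0:Int) < n <;> by_cases hq : n ≤ 12 <;> simp [hp, hq]
         have b2 : (decide (13 ≤ n) && decide (n ≤ 17)) = decide (13 ≤ n ∧ n ≤ 17) := by
          by_cases hp : (13:Int) ≤ n <;> by_cases hq : n ≤ 17 <;> simp [hp, hq]
         have b3 : (decide (18 ≤ n) && decide (n ≤ 25)) = decide (18 ≤ n ∧ n ≤ 25) := by
          by_cases hp : (18:Int) ≤ n <;> by_cases hq : n ≤ 25 <;> simp [hp, hq]
         simp only [List.map_cons, pvCount_cons, hwc, b1, b2, b3]) <;>
        (try simp only [decide_eq_true (by omega : (0:Int) < n ∧ n ≤ 12), if_true]) <;>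
        (try simp only [decide_eq_false (by omega : ¬ ((0:Int) < n ∧ n ≤ 12)), Bool.false_eq_true, if_false]) <;>
        (try simp only [decide_eq_true (by omega : (13:Int) ≤ n ∧ n ≤ 17), if_true]) <;>
        (try simp only [decide_eq_false (by omega : ¬ ((13:Int) ≤ n ∧ n ≤ 17)), Bool.false_eq_true, if_false]) <;>
        (try simp only [decide_eq_true (by omega : (18:Int) ≤ n ∧ n ≤ 25), if_true]) <;>
        (try simp only [decide_eq_false (by omega : ¬ ((18:Int) ≤ n ∧ n ≤ 25)), Bool.false_eq_true, if_false]) <;>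
        (try simp only [decide_eq_true (by omega : (25:Int) < n), if_true]) <;>
        (try simp only [decide_eq_false (by omega : ¬ ((25:Int) < n)), Bool.false_eq_true, if_false]) <;>
        (congr 1 <;> ring)

lemma pvD_items (a b c d : Int) :
    (pvD a b c d).items = [("faciles de leer", a), ("aceptable para leer", b),
                          ("dificil de leer", c), ("muy dificil", d)] := rfl

-- ===== VERDICT (by name: the statement is the Claim_ definition above) =====
theorem evaluar_resumen_spec : Claim_equal_evaluar_resumen := by
  intro resumen _
  unfold Spec_evaluar_resumen evaluar_resumen evaluar_resumen_alt
  have h0 : PySem.Dict.ofList [("faciles de leer", (0:Int)), ("aceptable para leer", 0),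
                       ("dificil de leer", 0), ("muy dificil", 0)] = pvD 0 0 0 0 := rfl
  simp only [h0]
  rw [loop_lemma]
  simp only [pvD_items, zero_add]
  rfl
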